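-- pv_equiv track=rewrite | github.com/AnusreePrakashan/ExamHallAutomation | app.py | pick_year_for_seat
-- ===== SOURCE A (Python) =====
-- def pick_year_for_seat(by_year_queues, forbidden_year=None):
--     """
--     Pick next year to seat, trying to avoid forbidden_year.
--     Greedy: pick year with most remaining students, excluding forbidden if possible.
--     Returns year int or None.
--     """
--     candidates = []
--     for y, q in by_year_queues.items():
--         if q:
--             candidates.append((len(q), y))
--     if not candidates:
--         return None
--
--     # try best excluding forbidden
--     candidates.sort(reverse=True)
--     for _, y in candidates:
--         if forbidden_year is None or y != forbidden_year:
--             return y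
--
--     # if only forbidden available
--     return candidates[0][1]
-- ===== SOURCE B (Python) =====
-- def pick_year_for_seat(by_year_queues, forbidden_year=None):
--     """Single pass, no sort: track the best (count, year) tuple overall and
--     among allowed years; tuple comparison reproduces the year tie-break."""
--     best_allowed = None
--     best_any = None
--     for y, q in by_year_queues.items():
--         if not q:
--             continue
--         cand = (len(q), y)
--         if best_any is None or cand > best_any:
--             best_any = cand
--         if (forbidden_year is None or y != forbidden_year) and (best_allowed is None or cand > best_allowed):
--             best_allowed = cand
--     if best_any is None:
--         return None
--     return (best_allowed if best_allowed is not None else best_any)[1]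
-- ===== Notes on version B (the rewrite author's own statement) =====
-- stated objective: faster
-- what changed: Replaces build-candidate-list + reverse sort + linear scan with a single pass keeping two running maxima ((count,year) tuples), one over all non-empty years and one over non-forbidden years.
import Mathlib
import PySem

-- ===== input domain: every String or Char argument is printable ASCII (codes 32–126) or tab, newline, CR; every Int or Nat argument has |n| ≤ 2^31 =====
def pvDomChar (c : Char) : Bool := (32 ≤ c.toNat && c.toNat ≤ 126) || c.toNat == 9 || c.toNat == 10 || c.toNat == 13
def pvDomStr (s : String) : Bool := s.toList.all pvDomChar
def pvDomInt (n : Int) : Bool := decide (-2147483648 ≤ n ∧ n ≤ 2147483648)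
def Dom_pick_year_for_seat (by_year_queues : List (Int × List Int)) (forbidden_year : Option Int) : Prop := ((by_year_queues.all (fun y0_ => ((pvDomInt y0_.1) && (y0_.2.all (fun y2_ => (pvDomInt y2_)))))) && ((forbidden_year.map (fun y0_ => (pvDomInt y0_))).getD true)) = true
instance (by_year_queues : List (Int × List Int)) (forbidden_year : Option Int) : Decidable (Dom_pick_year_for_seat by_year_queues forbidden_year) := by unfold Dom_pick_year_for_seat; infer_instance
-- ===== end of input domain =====

-- B replaces A's build-candidates + reverse-sort + scan by a single pass keeping two
-- running (count, year) maxima (over all years and over non-forbidden years).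


-- ===== PORT A =====
def pick_year_for_seat (by_year_queues : List (Int × List Int)) (forbidden_year : Option Int) : Option Int :=
  -- candidates = [(len(q), y) for y, q in by_year_queues.items() if q]
  let candidates := by_year_queues.foldl
    (fun acc yq => if !yq.2.isEmpty then acc ++ [((yq.2.length : Int), yq.1)] else acc) []
  if candidates.isEmpty then none
  else
    -- candidates.sort(reverse=True) : tuples compare lexicographically
    let s := PySem.List.sorted2 candidates Prod.fst Prod.snd true
    match s.find? (fun p => match forbidden_year with
                            | none => true
                            | some fy => decide (p.2 ≠ fy)) with
    | some p => some p.2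
    | none => (PySem.List.pyGet? s 0).map Prod.snd   -- candidates[0][1]

-- ===== PORT B =====
def pick_year_for_seat_alt (by_year_queues : List (Int × List Int)) (forbidden_year : Option Int) : Option Int :=
  let st := by_year_queues.foldl
    (fun (st : Option (Int × Int) × Option (Int × Int)) yq =>
      if yq.2.isEmpty then st
      else
        let cand : Int × Int := ((yq.2.length : Int), yq.1)
        let bn := match st.2 with
          | none => some cand
          | some b => if decide (b.1 < cand.1) || (decide (cand.1 = b.1) && decide (b.2 < cand.2))
                      then some cand else some b
        let ba := if (match forbidden_year with
                      | none => true
                      | some fy => decide (yq.1 ≠ fy)) then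
            match st.1 with
            | none => some cand
            | some b => if decide (b.1 < cand.1) || (decide (cand.1 = b.1) && decide (b.2 < cand.2))
                        then some cand else some b
          else st.1
        (ba, bn))
    (none, none)
  match st.2 with
  | none => none
  | some bn => some ((match st.1 with | some ba => ba | none => bn).2)

-- ===== PRECONDITION & SPEC =====
-- Pre_ excludes association lists with duplicate year keys: they do not represent any
-- Python dict (A's parameter is a dict), so A's list-level behaviour there is not defined.
def Pre_pick_year_for_seat (by_year_queues : List (Int × List Int)) (forbidden_year : Option Int) : Prop :=
  (by_year_queues.map Prod.fst).Nodup
instance (by_year_queues : List (Int × List Int)) (forbidden_year : Option Int) : Decidable (Pre_pick_year_for_seat by_year_queues forbidden_year) := by unfold Pre_pick_year_for_seat; infer_instance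
def pvWitness_pick_year_for_seat : (List (Int × List Int)) × Option Int :=
  ([(2020, [1, 2]), (2021, [3]), (2022, [])], some 2020)

def Spec_pick_year_for_seat (by_year_queues : List (Int × List Int)) (forbidden_year : Option Int) (out : Option Int) : Prop := out = pick_year_for_seat_alt by_year_queues forbidden_year
instance (by_year_queues : List (Int × List Int)) (forbidden_year : Option Int) (out : Option Int) : Decidable (Spec_pick_year_for_seat by_year_queues forbidden_year out) := by unfold Spec_pick_year_for_seat; infer_instance

-- ===== CLAIM (what is proved, stated in full; the proofs are below) =====
def Claim_equal_pick_year_for_seat : Prop := ∀ (by_year_queues : List (Int × List Int)) (forbidden_year : Option Int), Dom_pick_year_for_seat by_year_queues forbidden_year → Pre_pick_year_for_seat by_year_queues forbidden_year → Spec_pick_year_for_seat by_year_queues forbidden_year (pick_year_for_seat by_year_queues forbidden_year)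

-- ===== LEMMAS AND PROOFS =====

-- lexicographic (Python tuple) order on (Int × Int)
def pvLexLe (a b : Int × Int) : Prop := a.1 < b.1 ∨ (a.1 = b.1 ∧ a.2 ≤ b.2)

theorem pvLexLe_antisymm {a b : Int × Int} (h1 : pvLexLe a b) (h2 : pvLexLe b a) : a = b := by
  obtain ⟨a1, a2⟩ := a; obtain ⟨b1, b2⟩ := b
  simp only [pvLexLe] at h1 h2
  have : a1 = b1 ∧ a2 = b2 := by omega
  simp [this.1, this.2]

theorem pvLexLe_trans {a b c : Int × Int} (h1 : pvLexLe a b) (h2 : pvLexLe b c) : pvLexLe a c := by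
  simp only [pvLexLe] at *; omega

theorem pvLexLe_refl (a : Int × Int) : pvLexLe a a := by simp [pvLexLe]

-- B's running-max step
def pvStep (acc : Option (Int × Int)) (c : Int × Int) : Option (Int × Int) :=
  match acc with
  | none => some c
  | some b => if (decide (b.1 < c.1) || (decide (c.1 = b.1) && decide (b.2 < c.2))) = true
              then some c else some b

def pvBest (L : List (Int × Int)) : Option (Int × Int) := L.foldl pvStep none

-- the candidate list both programs effectively range over
def pvCands (l : List (Int × List Int)) : List (Int × Int) :=
  (l.filter (fun yq => !yq.2.isEmpty)).map (fun yq => ((yq.2.length : Int), yq.1))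

theorem pvStep_some {b : Option (Int × Int)} {c : Int × Int} : ∃ m, pvStep b c = some m := by
  cases b with
  | none => exact ⟨c, rfl⟩
  | some b' =>
    by_cases hh : (decide (b'.1 < c.1) || (decide (c.1 = b'.1) && decide (b'.2 < c.2))) = true
    · exact ⟨c, by simp only [pvStep]; rw [if_pos hh]⟩
    · exact ⟨b', by simp only [pvStep]; rw [if_neg hh]⟩

theorem pvFoldStep_some {L : List (Int × Int)} {b : Int × Int} :
    ∃ m, L.foldl pvStep (some b) = some m := by
  induction L generalizing b with
  | nil => exact ⟨b, rfl⟩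
  | cons c t ih =>
    simp only [List.foldl_cons]
    obtain ⟨m, hm⟩ := pvStep_some (b := some b) (c := c)
    rw [hm]; exact ih

theorem pvFoldStep_max {L : List (Int × Int)} {b m : Int × Int}
    (h : L.foldl pvStep (some b) = some m) :
    (m = b ∨ m ∈ L) ∧ pvLexLe b m ∧ ∀ x ∈ L, pvLexLe x m := by
  induction L generalizing b with
  | nil =>
    simp only [List.foldl_nil, Option.some.injEq] at h
    subst h; exact ⟨Or.inl rfl, pvLexLe_refl _, by simp⟩
  | cons c t ih =>
    simp only [List.foldl_cons] at h
    by_cases hgt : (decide (b.1 < c.1) || (decide (c.1 = b.1) && decide (b.2 < c.2))) = true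
    · rw [show pvStep (some b) c = some c by simp only [pvStep]; rw [if_pos hgt]] at h
      obtain ⟨hmem, hble, hall⟩ := ih h
      have hbc : pvLexLe b c := by
        simp only [Bool.or_eq_true, Bool.and_eq_true, decide_eq_true_eq] at hgt
        simp only [pvLexLe]; omega
      refine ⟨Or.inr ?_, pvLexLe_trans hbc hble, ?_⟩
      · rcases hmem with h | h
        · subst h; simp
        · simp [h]
      · intro x hx
        rcases List.mem_cons.mp hx with h | h
        · subst h; exact hble
        · exact hall x h
    · rw [show pvStep (some b) c = some b by simp only [pvStep]; rw [if_neg hgt]] at h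
      obtain ⟨hmem, hble, hall⟩ := ih h
      have hcb : pvLexLe c b := by
        simp only [Bool.or_eq_true, Bool.and_eq_true, decide_eq_true_eq] at hgt
        simp only [pvLexLe]; omega
      refine ⟨?_, hble, ?_⟩
      · rcases hmem with h | h
        · exact Or.inl h
        · exact Or.inr (by simp [h])
      · intro x hx
        rcases List.mem_cons.mp hx with h | h
        · subst h; exact pvLexLe_trans hcb hble
        · exact hall x h

theorem pvBest_max {L : List (Int × Int)} {m : Int × Int} (h : pvBest L = some m) :
    m ∈ L ∧ ∀ x ∈ L, pvLexLe x m := by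
  cases L with
  | nil => simp [pvBest] at h
  | cons c t =>
    have h' : t.foldl pvStep (some c) = some m := h
    obtain ⟨hmem, hble, hall⟩ := pvFoldStep_max h'
    refine ⟨?_, ?_⟩
    · rcases hmem with h | h
      · subst h; simp
      · simp [h]
    · intro x hx
      rcases List.mem_cons.mp hx with h | h
      · subst h; exact hble
      · exact hall x h

theorem pvBest_isSome {L : List (Int × Int)} (h : L ≠ []) : ∃ m, pvBest L = some m := by
  cases L with
  | nil => exact absurd rfl h
  | cons c t => exact pvFoldStep_some (L := t) (b := c)

theorem pvBest_eq_of_max {L : List (Int × Int)} {m : Int × Int}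
    (hm : m ∈ L) (hmax : ∀ x ∈ L, pvLexLe x m) : pvBest L = some m := by
  have hne : L ≠ [] := List.ne_nil_of_mem hm
  obtain ⟨m', hm'⟩ := pvBest_isSome hne
  obtain ⟨hm'mem, hm'max⟩ := pvBest_max hm'
  rw [hm', pvLexLe_antisymm (hm'max m hm) (hmax m' hm'mem)]

-- B's loop is the two running maxima over pvCands
theorem pvAltFold (p : Int → Bool) (l : List (Int × List Int))
    (ba bn : Option (Int × Int)) :
    l.foldl
      (fun (st : Option (Int × Int) × Option (Int × Int)) yq =>
        if yq.2.isEmpty then st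
        else
          let cand : Int × Int := ((yq.2.length : Int), yq.1)
          let bn := match st.2 with
            | none => some cand
            | some b => if decide (b.1 < cand.1) || (decide (cand.1 = b.1) && decide (b.2 < cand.2))
                        then some cand else some b
          let ba := if p yq.1 then
              match st.1 with
              | none => some cand
              | some b => if decide (b.1 < cand.1) || (decide (cand.1 = b.1) && decide (b.2 < cand.2))
                          then some cand else some b
            else st.1
          (ba, bn)) (ba, bn)
    = (((pvCands l).filter (fun c => p c.2)).foldl pvStep ba,
       (pvCands l).foldl pvStep bn) := by
  induction l generalizing ba bn with
  | nil => simp [pvCands]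
  | cons yq t ih =>
    by_cases he : yq.2.isEmpty
    · simp only [List.foldl_cons, if_pos he]
      rw [ih]
      simp [pvCands, he]
    · simp only [List.foldl_cons, if_neg he]
      rw [ih]
      have hc : pvCands (yq :: t) = ((yq.2.length : Int), yq.1) :: pvCands t := by
        simp [pvCands, he]
      rw [hc]
      by_cases hp : p yq.1 = true
      · simp only [List.filter_cons, hp, if_true, List.foldl_cons]
        cases ba <;> cases bn <;> rfl
      · simp only [List.filter_cons]
        rw [if_neg (by simpa using hp)]
        simp only [List.foldl_cons]
        rw [if_neg hp]
        cases bn <;> rfl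

-- A's candidate-building loop
theorem pvACands (l : List (Int × List Int)) :
    l.foldl (fun acc yq => if !yq.2.isEmpty then acc ++ [((yq.2.length : Int), yq.1)] else acc) []
      = pvCands l := by
  simpa [pvCands] using
    PySem.List.foldl_append_if (l := l) (acc := ([] : List (Int × Int)))
      (p := fun yq => !yq.2.isEmpty) (f := fun yq => ((yq.2.length : Int), yq.1))

-- sorted(reverse=True) on tuples produces a lex-descending list
theorem pvInsertBy_pairwise (before : Int × Int → Int × Int → Bool)
    (hbe : ∀ a b, before a b = (decide (b.1 < a.1) || (!decide (a.1 < b.1) && decide (b.2 < a.2))))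
    (x : Int × Int) (ys : List (Int × Int))
    (h : ys.Pairwise (fun a b => pvLexLe b a)) :
    (PySem.List.insertBy before x ys).Pairwise (fun a b => pvLexLe b a) := by
  induction ys with
  | nil => simp [PySem.List.insertBy]
  | cons y t ih =>
    rw [List.pairwise_cons] at h
    by_cases hb : before x y = true
    · rw [show PySem.List.insertBy before x (y :: t) = x :: y :: t by
        simp [PySem.List.insertBy, hb]]
      have hyx : pvLexLe y x := by
        rw [hbe] at hb
        simp only [Bool.or_eq_true, Bool.and_eq_true, Bool.not_eq_eq_eq_not, Bool.not_true,
          decide_eq_true_eq, decide_eq_false_iff_not] at hb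
        simp only [pvLexLe]; omega
      refine List.pairwise_cons.mpr ⟨?_, List.pairwise_cons.mpr ⟨h.1, h.2⟩⟩
      intro z hz
      rcases List.mem_cons.mp hz with hzy | hzt
      · subst hzy; exact hyx
      · exact pvLexLe_trans (h.1 z hzt) hyx
    · rw [show PySem.List.insertBy before x (y :: t) = y :: PySem.List.insertBy before x t by
        simp only [PySem.List.insertBy]; rw [if_neg hb]]
      refine List.pairwise_cons.mpr ⟨?_, ih h.2⟩
      intro z hz
      rcases (PySem.List.mem_insertBy before x z t).mp hz with hzx | hzt
      · subst hzx
        rw [hbe] at hb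
        simp only [Bool.or_eq_true, Bool.and_eq_true, Bool.not_eq_eq_eq_not, Bool.not_true,
          decide_eq_true_eq, decide_eq_false_iff_not] at hb
        simp only [pvLexLe]; omega
      · exact h.1 z hzt

theorem pvSorted2_pairwise (xs : List (Int × Int)) :
    (PySem.List.sorted2 xs Prod.fst Prod.snd true).Pairwise (fun a b => pvLexLe b a) := by
  show (List.foldl (fun acc x => PySem.List.insertBy _ x acc) [] xs).Pairwise _
  generalize hacc : ([] : List (Int × Int)) = acc
  have hp : acc.Pairwise (fun a b : Int × Int => pvLexLe b a) := by subst hacc; simp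
  clear hacc
  induction xs generalizing acc with
  | nil => simpa using hp
  | cons x t ih =>
    simp only [List.foldl_cons]
    exact ih _ (pvInsertBy_pairwise _ (fun a b => rfl) x acc hp)

-- first match in a lex-descending list is the maximum of the matching elements
theorem pvFind_max {S : List (Int × Int)} {p : Int × Int → Bool} {m : Int × Int}
    (hS : S.Pairwise (fun a b => pvLexLe b a)) (h : S.find? p = some m) :
    m ∈ S ∧ p m = true ∧ ∀ x ∈ S, p x = true → pvLexLe x m := by
  induction S with
  | nil => simp at h
  | cons c t ih =>
    rw [List.pairwise_cons] at hS
    by_cases hpc : p c = true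
    · rw [List.find?_cons_of_pos hpc, Option.some.injEq] at h
      subst h
      exact ⟨by simp, hpc, by
        intro x hx _
        rcases List.mem_cons.mp hx with h | h
        · subst h; exact pvLexLe_refl _
        · exact hS.1 x h⟩
    · rw [List.find?_cons_of_neg (by simp [hpc])] at h
      obtain ⟨hmem, hpm, hall⟩ := ih hS.2 h
      refine ⟨by simp [hmem], hpm, ?_⟩
      intro x hx hpx
      rcases List.mem_cons.mp hx with h | h
      · subst h; exact absurd hpx hpc
      · exact hall x h hpx

-- the core equality, for an arbitrary allowed-predicate on years
theorem pvMain (p : Int → Bool) (l : List (Int × List Int)) :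
    (if (pvCands l).isEmpty then none
     else
       match (PySem.List.sorted2 (pvCands l) Prod.fst Prod.snd true).find? (fun c => p c.2) with
       | some m => some m.2
       | none => (PySem.List.pyGet? (PySem.List.sorted2 (pvCands l) Prod.fst Prod.snd true) 0).map Prod.snd)
    = (match ((pvCands l).foldl pvStep none : Option (Int × Int)) with
       | none => none
       | some bn =>
         some ((match (((pvCands l).filter (fun c : Int × Int => p c.2)).foldl pvStep none : Option (Int × Int)) with
                | some ba => ba
                | none => bn).2)) := by
  by_cases hC : pvCands l = []
  · simp [hC]
  · rw [if_neg (by simpa [List.isEmpty_iff] using hC)]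
    set S := PySem.List.sorted2 (pvCands l) Prod.fst Prod.snd true with hSdef
    have hperm : S.Perm (pvCands l) := PySem.List.sorted2_perm _ _ _ _
    have hpair : S.Pairwise (fun a b => pvLexLe b a) := pvSorted2_pairwise _
    have hSne : S ≠ [] := by
      intro h
      exact hC (List.Perm.nil_eq (h ▸ hperm)).symm
    cases hfind : S.find? (fun c => p c.2) with
    | some m =>
      obtain ⟨hmS, hpm, hmax⟩ := pvFind_max hpair hfind
      have hfilter : ((pvCands l).filter (fun c => p c.2)).foldl pvStep none = some m := by
        apply pvBest_eq_of_max (L := (pvCands l).filter (fun c => p c.2))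
        · exact List.mem_filter.mpr ⟨hperm.mem_iff.mp hmS, hpm⟩
        · intro x hx
          obtain ⟨hxC, hpx⟩ := List.mem_filter.mp hx
          exact hmax x (hperm.mem_iff.mpr hxC) hpx
      obtain ⟨M, hM⟩ := pvBest_isSome hC
      have hMfold : (pvCands l).foldl pvStep none = some M := hM
      simp only [hfilter, hMfold]
    | none =>
      have hnone : ∀ x ∈ S, ¬ p x.2 = true := by
        intro x hx
        simpa using List.find?_eq_none.mp hfind x hx
      have hfilter : (pvCands l).filter (fun c => p c.2) = [] := by
        apply List.filter_eq_nil_iff.mpr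
        intro x hxC
        simpa using hnone x (hperm.mem_iff.mpr hxC)
      obtain ⟨h0, t0, hS⟩ := List.exists_cons_of_ne_nil hSne
      have hh0max : ∀ x ∈ pvCands l, pvLexLe x h0 := by
        intro x hx
        have hxS := hperm.mem_iff.mpr hx
        rw [hS] at hxS
        rcases List.mem_cons.mp hxS with h | h
        · subst h; exact pvLexLe_refl _
        · exact ((List.pairwise_cons.mp (hS ▸ hpair)).1) x h
      have hbest : (pvCands l).foldl pvStep none = some h0 :=
        pvBest_eq_of_max (hperm.mem_iff.mp (hS ▸ List.mem_cons_self)) hh0max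
      rw [hS]
      simp only [hfilter, hbest, List.foldl_nil]
      simp [PySem.List.pyGet?, PySem.List.pyIdx?]

-- ===== VERDICT (by name: the statement is the Claim_ definition above) =====
theorem pick_year_for_seat_spec : Claim_equal_pick_year_for_seat := by
  intro l f _ _
  show pick_year_for_seat l f = pick_year_for_seat_alt l f
  cases f with
  | none =>
    unfold pick_year_for_seat pick_year_for_seat_alt
    rw [pvACands l, pvAltFold (fun _ => true) l none none]
    exact pvMain (fun _ => true) l
  | some fy =>
    unfold pick_year_for_seat pick_year_for_seat_alt
    rw [pvACands l, pvAltFold (fun y => decide (y ≠ fy)) l none none]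
    exact pvMain (fun y => decide (y ≠ fy)) l
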